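-- pv_equiv track=rewrite | github.com/stephenfu1234/advent-of-code-2024 | Day 18/part1.py | create_memory_space
-- ===== SOURCE A (Python) =====
-- def create_memory_space(bytes, max_bytes):
--     height = 0
--     width = 0
--     for c, r in bytes:
--         if c > width: width = c
--         if r > height: height = r
--
--     # add 1 to account for zero based index
--     height += 1
--     width += 1
--
--     memory_space = [['.'] * width for _ in range(height)]
--
--     for idx, byte in enumerate(bytes):
--         if idx < max_bytes:
--             r = byte[1]
--             c = byte[0]
--             memory_space[r][c] = '#'
--
--     add_border_to_maze(memory_space)
--
--     return memory_space, height, width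
--
-- def add_border_to_maze(maze):
--     # add left and right border
--     for row in maze:
--         row.insert(0, '#')
--         row.append('#')
--
--     # add top border
--     maze.insert(0, len(maze[0]) * ['#'])
--     # add bottom border
--     maze.append(maze[0])
-- ===== SOURCE B (Python) =====
-- def create_memory_space(bytes, max_bytes):
--     width = 1 + max([0] + [c for c, _ in bytes])
--     height = 1 + max([0] + [r for _, r in bytes])
--     obstacles = {(c, r) for c, r in bytes[:max(0, max_bytes)]}
--     border = ['#'] * (width + 2)
--     grid = [border]
--     for r in range(height):
--         grid.append(['#'] + ['#' if (c, r) in obstacles else '.' for c in range(width)] + ['#'])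
--     grid.append(border)
--     return grid, height, width
-- ===== Notes on version B (the rewrite author's own statement) =====
-- stated objective: simpler
-- what changed: B builds the bordered grid directly in one pass (each cell decided by a border test or membership of (c,r) in a set of the first max_bytes bytes) instead of A's allocate-'.'-grid, mutate cells one by one, then splice border rows/columns in afterwards.
-- intended difference: On inputs where one of the first max_bytes bytes has a negative but in-range coordinate, A's Python negative indexing wraps around and marks a cell on the opposite edge of the grid '#', while B leaves that cell '.', which is what the coordinates mean (a byte outside the grid falls in no cell). — e.g. on create_memory_space([(-1, 0)], 1): A returns ([["#", "#", "#"], ["#", "#", "#"], ["#", "#", "#"]], 1, 1), B returns ([["#", "#", "#"], ["#", ".", "#"], ["#", "#", "#"]], 1, 1)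
import Mathlib
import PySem

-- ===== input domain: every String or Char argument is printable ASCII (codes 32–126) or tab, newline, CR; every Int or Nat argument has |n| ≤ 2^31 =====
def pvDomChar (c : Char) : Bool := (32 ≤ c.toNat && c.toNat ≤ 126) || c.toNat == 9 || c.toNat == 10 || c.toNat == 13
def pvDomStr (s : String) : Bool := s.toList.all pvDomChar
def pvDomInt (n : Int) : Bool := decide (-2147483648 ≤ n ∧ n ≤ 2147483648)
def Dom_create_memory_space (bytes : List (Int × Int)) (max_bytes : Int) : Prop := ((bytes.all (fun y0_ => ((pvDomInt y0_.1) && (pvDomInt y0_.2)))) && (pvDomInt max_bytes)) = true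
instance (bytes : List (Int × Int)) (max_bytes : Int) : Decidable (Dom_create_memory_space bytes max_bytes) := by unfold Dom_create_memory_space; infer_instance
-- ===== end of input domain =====

-- B builds the bordered grid directly from an obstacle set instead of mutating a '.'-grid cell by cell and
-- splicing a border in afterwards (objective: simpler). Python A mutates the list it builds internally only;
-- no argument is mutated, and the equivalence is about the return value.

-- ===== PORT A =====
-- loop body of 'memory_space[r][c] = '#'' : read row r (negative index from the end), set column c
def pvWrite (ms : List (List String)) (b : Int × Int) : List (List String) :=
  PySem.List.pySetD ms b.2 (PySem.List.pySetD (PySem.List.pyGetD ms b.2 []) b.1 "#")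

-- helper add_border_to_maze, returned functionally (Python mutates 'maze' in place)
def add_border_to_maze (maze : List (List String)) : List (List String) :=
  -- row.insert(0,'#'); row.append('#')
  let maze := maze.map (fun row => PySem.List.insert row 0 "#" ++ ["#"])
  -- maze.insert(0, len(maze[0]) * ['#'])   (maze[0] exists: maze is nonempty whenever A reaches this call)
  let maze := PySem.List.insert maze 0 (List.replicate (PySem.List.pyGetD maze 0 []).length "#")
  -- maze.append(maze[0])
  maze ++ [PySem.List.pyGetD maze 0 []]

def create_memory_space (bytes : List (Int × Int)) (max_bytes : Int) : List (List String) × Int × Int :=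
  let hw := bytes.foldl (fun (p : Int × Int) b =>
      (if b.2 > p.1 then b.2 else p.1, if b.1 > p.2 then b.1 else p.2)) (0, 0)
  let height := hw.1 + 1
  let width := hw.2 + 1
  -- [['.'] * width for _ in range(height)]  (list-repetition with a negative count is empty, as toNat clamps)
  let memory_space := (PySem.List.pyRange 0 height 1).map (fun _ => List.replicate width.toNat ".")
  let memory_space := (PySem.List.enumerate bytes 0).foldl
      (fun ms p => if p.1 < max_bytes then pvWrite ms p.2 else ms) memory_space
  (add_border_to_maze memory_space, height, width)

-- ===== PORT B =====
def create_memory_space_alt (bytes : List (Int × Int)) (max_bytes : Int) : List (List String) × Int × Int :=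
  -- width = 1 + max([0] + [c for c, _ in bytes])  (max of a 0-headed list = foldl max 0 over the rest)
  let width : Int := 1 + (bytes.map (fun b => b.1)).foldl max 0
  let height : Int := 1 + (bytes.map (fun b => b.2)).foldl max 0
  let obstacles : PySem.Set (Int × Int) :=
    PySem.Set.ofList (PySem.List.slice bytes none (some (max 0 max_bytes)))
  let border : List String := List.replicate (width + 2).toNat "#"
  let grid := border ::
    ((PySem.List.pyRange 0 height 1).map (fun r =>
      "#" :: ((PySem.List.pyRange 0 width 1).map (fun c =>
        if obstacles.contains (c, r) then "#" else ".")) ++ ["#"])) ++ [border]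
  (grid, height, width)

-- ===== PRECONDITION & SPEC =====
-- grid width/height A derives from the input: 1 + the maximum first (resp. second) coordinate, at least 1
def pvW (bytes : List (Int × Int)) : Int := 1 + (bytes.map (fun b => b.1)).foldl max 0
def pvH (bytes : List (Int × Int)) : Int := 1 + (bytes.map (fun b => b.2)).foldl max 0

-- Pre_ excludes exactly the inputs where A raises IndexError: one of the first max_bytes bytes has a
-- coordinate below -(grid width) resp. -(grid height), so the negative index is out of range.
def Pre_create_memory_space (bytes : List (Int × Int)) (max_bytes : Int) : Prop :=
  ∀ b ∈ bytes.take max_bytes.toNat, -(pvW bytes) ≤ b.1 ∧ -(pvH bytes) ≤ b.2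
instance (bytes : List (Int × Int)) (max_bytes : Int) : Decidable (Pre_create_memory_space bytes max_bytes) := by
  unfold Pre_create_memory_space; infer_instance

def pvWitness_create_memory_space : (List (Int × Int)) × Int := ([(1, 0), (0, 2)], 1)

-- On inputs where one of the first max_bytes bytes has a negative (but in-range) coordinate, A's Python
-- negative indexing wraps around and marks a cell on the opposite edge of the grid '#'; B treats such a byte
-- as lying outside the grid and marks nothing, which is what the coordinates mean.
def D_create_memory_space (bytes : List (Int × Int)) (max_bytes : Int) : Prop :=
  ∃ b ∈ bytes.take max_bytes.toNat, b.1 < 0 ∨ b.2 < 0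
instance (bytes : List (Int × Int)) (max_bytes : Int) : Decidable (D_create_memory_space bytes max_bytes) := by
  unfold D_create_memory_space; infer_instance

def Spec_create_memory_space (bytes : List (Int × Int)) (max_bytes : Int) (out : List (List String) × Int × Int) : Prop :=
  ¬ D_create_memory_space bytes max_bytes → out = create_memory_space_alt bytes max_bytes
instance (bytes : List (Int × Int)) (max_bytes : Int) (out : List (List String) × Int × Int) : Decidable (Spec_create_memory_space bytes max_bytes out) := by
  unfold Spec_create_memory_space; infer_instance

def pvDiffWitness_create_memory_space : (List (Int × Int)) × Int := ([(-1, 0)], 1)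
def pvDiffWitnessOut_create_memory_space : (List (List String) × Int × Int) × (List (List String) × Int × Int) :=
  (([["#", "#", "#"], ["#", "#", "#"], ["#", "#", "#"]], 1, 1),
   ([["#", "#", "#"], ["#", ".", "#"], ["#", "#", "#"]], 1, 1))

-- ===== CLAIM (what is proved, stated in full; the proofs are below) =====
def Claim_unchanged_create_memory_space : Prop := ∀ (bytes : List (Int × Int)) (max_bytes : Int), Dom_create_memory_space bytes max_bytes → Pre_create_memory_space bytes max_bytes → Spec_create_memory_space bytes max_bytes (create_memory_space bytes max_bytes)
def Claim_changed_create_memory_space : Prop := Dom_create_memory_space (pvDiffWitness_create_memory_space.1) (pvDiffWitness_create_memory_space.2) ∧ Pre_create_memory_space (pvDiffWitness_create_memory_space.1) (pvDiffWitness_create_memory_space.2) ∧ D_create_memory_space (pvDiffWitness_create_memory_space.1) (pvDiffWitness_create_memory_space.2) ∧ create_memory_space (pvDiffWitness_create_memory_space.1) (pvDiffWitness_create_memory_space.2) = pvDiffWitnessOut_create_memory_space.1 ∧ create_memory_space_alt (pvDiffWitness_create_memory_space.1) (pvDiffWitness_create_memory_space.2) = pvDiffWitnessOut_create_memory_space.2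 ∧ pvDiffWitnessOut_create_memory_space.1 ≠ pvDiffWitnessOut_create_memory_space.2

-- ===== LEMMAS AND PROOFS =====

theorem pv_fold_pair (bytes : List (Int × Int)) :
    bytes.foldl (fun (p : Int × Int) b =>
      (if b.2 > p.1 then b.2 else p.1, if b.1 > p.2 then b.1 else p.2)) (0, 0)
    = ((bytes.map (fun b => b.2)).foldl max 0, (bytes.map (fun b => b.1)).foldl max 0) := by
  have hstep : (fun (p : Int × Int) (b : Int × Int) =>
      ((if b.2 > p.1 then b.2 else p.1), (if b.1 > p.2 then b.1 else p.2)))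
      = fun p b => (max p.1 b.2, max p.2 b.1) := by
    funext p b
    have h1 : (if b.2 > p.1 then b.2 else p.1) = max p.1 b.2 := by
      rcases le_or_gt b.2 p.1 with h | h
      · simp [not_lt.mpr h, max_eq_left h]
      · simp [h, max_eq_right h.le]
    have h2 : (if b.1 > p.2 then b.1 else p.2) = max p.2 b.1 := by
      rcases le_or_gt b.1 p.2 with h | h
      · simp [not_lt.mpr h, max_eq_left h]
      · simp [h, max_eq_right h.le]
    rw [h1, h2]
  rw [hstep, List.foldl_map, List.foldl_map]
  exact PySem.List.foldl_prod_mk (fun a b => max a b.2) (fun a b => max a b.1) bytes 0 0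

theorem pv_enum_foldl_take {α σ : Type} (wr : σ → α → σ) (m : Int) :
    ∀ (xs : List α) (s : Int) (g : σ),
    (PySem.List.enumerate xs s).foldl (fun ms p => if p.1 < m then wr ms p.2 else ms) g
      = (xs.take (m - s).toNat).foldl wr g := by
  intro xs
  induction xs with
  | nil => intro s g; simp [PySem.List.enumerate]
  | cons x xs ih =>
    intro s g
    rw [PySem.List.enumerate_cons, List.foldl_cons]
    by_cases h : s < m
    · have ht : (m - s).toNat = (m - (s+1)).toNat + 1 := by omega
      rw [ht, List.take_succ_cons, List.foldl_cons]
      simp only [h, if_pos]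
      exact ih (s+1) (wr g x)
    · have ht : (m - s).toNat = 0 := by omega
      have ht2 : (m - (s+1)).toNat = 0 := by omega
      rw [ht, List.take_zero, List.foldl_nil]
      simp only [h, if_neg, not_false_iff]
      rw [ih (s+1) g, ht2, List.take_zero, List.foldl_nil]

theorem pv_foldl_write_spec :
    ∀ (L : List (Int × Int)) (g : List (List String)) (Wn : Nat),
    (∀ row ∈ g, row.length = Wn) →
    (∀ b ∈ L, 0 ≤ b.1 ∧ b.1 < (Wn : Int) ∧ 0 ≤ b.2 ∧ b.2 < (g.length : Int)) →
    (L.foldl pvWrite g).length = g.length ∧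
    (∀ row ∈ L.foldl pvWrite g, row.length = Wn) ∧
    ∀ (r c : Nat), ((L.foldl pvWrite g)[r]?.bind (·[c]?)) =
      if ((c : Int), (r : Int)) ∈ L then some "#" else (g[r]?.bind (·[c]?)) := by
  intro L
  induction L with
  | nil => intro g Wn hw hb; simpa using hw
  | cons b L ih =>
    intro g Wn hw hb
    obtain ⟨hb1, hb2, hb3, hb4⟩ := hb b (List.mem_cons_self)
    have hbL : ∀ x ∈ L, 0 ≤ x.1 ∧ x.1 < (Wn : Int) ∧ 0 ≤ x.2 ∧ x.2 < (g.length : Int) :=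
      fun x hx => hb x (List.mem_cons_of_mem _ hx)
    have hr2 : b.2.toNat < g.length := by omega
    -- unfold the single write
    have hrow : PySem.List.pyGetD g b.2 [] = g[b.2.toNat] := by
      rw [PySem.List.pyGetD_eq_getElem _ _ hb3 (by simpa using hb4)]
    have hg' : pvWrite g b = g.set b.2.toNat (g[b.2.toNat].set b.1.toNat "#") := by
      rw [pvWrite, hrow, PySem.List.pySetD_of_nonneg _ _ hb3,
        PySem.List.pySetD_of_nonneg _ _ hb1]
    have hlen' : (pvWrite g b).length = g.length := by rw [hg']; simp
    have hw' : ∀ row ∈ pvWrite g b, row.length = Wn := by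
      rw [hg']
      intro row hrowm
      rcases List.mem_or_eq_of_mem_set hrowm with h | h
      · exact hw row h
      · rw [h]; simp [hw _ (List.getElem_mem hr2)]
    have hbL' : ∀ x ∈ L, 0 ≤ x.1 ∧ x.1 < (Wn : Int) ∧ 0 ≤ x.2 ∧ x.2 < ((pvWrite g b).length : Int) := by
      rw [hlen']; exact hbL
    obtain ⟨ih1, ih2, ih3⟩ := ih (pvWrite g b) Wn hw' hbL'
    rw [List.foldl_cons]
    refine ⟨by rw [ih1, hlen'], ih2, ?_⟩
    intro r c
    rw [ih3 r c]
    by_cases hmL : ((c : Int), (r : Int)) ∈ L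
    · simp [hmL, List.mem_cons_of_mem _ hmL]
    · by_cases hm : ((c : Int), (r : Int)) ∈ b :: L
      · -- then b = (c, r)
        have heq : b = ((c : Int), (r : Int)) := by
          rcases List.mem_cons.mp hm with h | h
          · exact h.symm
          · exact absurd h hmL
        have hc1 : b.1 = (c : Int) := by rw [heq]
        have hc2 : b.2 = (r : Int) := by rw [heq]
        have hc : b.1.toNat = c := by omega
        have hrr : b.2.toNat = r := by omega
        simp only [hmL, if_neg, not_false_iff, hm, if_pos]
        rw [hg', List.getElem?_set, if_pos hrr, if_pos hr2]
        simp only [Option.bind]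
        rw [List.getElem?_set, if_pos hc]
        have hcW : c < Wn := by omega
        rw [if_pos (by rw [hw _ (List.getElem_mem hr2)]; omega)]
      · have hmb : b ≠ ((c : Int), (r : Int)) := fun h => hm (h ▸ List.mem_cons_self)
        simp only [hm, if_neg, not_false_iff, hmL]
        rw [hg']
        by_cases hrr : b.2.toNat = r
        · have hcc : b.1.toNat ≠ c := by
            intro hcc
            exact hmb (Prod.ext (by omega) (by omega))
          rw [List.getElem?_set, if_pos hrr, if_pos hr2]
          simp only [Option.bind]
          rw [List.getElem?_set, if_neg hcc, ← hrr, List.getElem?_eq_getElem hr2]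
        · rw [List.getElem?_set, if_neg hrr]

theorem pv_main (bytes : List (Int × Int)) (mb : Int)
    (hnd : ∀ b ∈ bytes.take mb.toNat, 0 ≤ b.1 ∧ 0 ≤ b.2) :
    create_memory_space bytes mb = create_memory_space_alt bytes mb := by
  have hMW := PySem.List.le_foldl_max (bytes.map (fun b => b.1)) 0
  have hMH := PySem.List.le_foldl_max (bytes.map (fun b => b.2)) 0
  set MW := (bytes.map (fun b => b.1)).foldl max 0 with hMWdef
  set MH := (bytes.map (fun b => b.2)).foldl max 0 with hMHdef
  set P := bytes.take mb.toNat with hPdef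
  have hbnd : ∀ b ∈ P, 0 ≤ b.1 ∧ b.1 ≤ MW ∧ 0 ≤ b.2 ∧ b.2 ≤ MH := by
    intro b hbP
    have hmem : b ∈ bytes := List.mem_of_mem_take hbP
    exact ⟨(hnd b hbP).1, hMW.2 b.1 (List.mem_map_of_mem hmem),
      (hnd b hbP).2, hMH.2 b.2 (List.mem_map_of_mem hmem)⟩
  set Hn : Nat := (MH + 1).toNat with hHndef
  set Wn : Nat := (MW + 1).toNat with hWndef
  have hg0 : (PySem.List.pyRange 0 (MH + 1) 1).map
      (fun _ => List.replicate (MW + 1).toNat ".")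
      = List.replicate Hn (List.replicate Wn (".":String)) := by
    rw [List.map_const', PySem.List.length_pyRange_one]
    rw [show ((MH + 1 - 0).toNat) = Hn by omega]
  set g0 := List.replicate Hn (List.replicate Wn (".":String)) with hg0def
  have hg0len : g0.length = Hn := by simp [hg0def]
  have hg0rows : ∀ row ∈ g0, row.length = Wn := by
    intro row hrow
    rw [List.eq_of_mem_replicate hrow]; simp
  obtain ⟨hlen, hrows, hcell⟩ := pv_foldl_write_spec P g0 Wn hg0rows (by
    intro b hbP
    obtain ⟨h1, h2, h3, h4⟩ := hbnd b hbP
    exact ⟨h1, by omega, h3, by rw [hg0len]; omega⟩)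
  set Gfin := P.foldl pvWrite g0 with hGfindef
  -- A's side, reduced
  have hA : create_memory_space bytes mb
      = (add_border_to_maze Gfin, MH + 1, MW + 1) := by
    unfold create_memory_space
    dsimp only
    rw [pv_fold_pair]
    dsimp only
    rw [pv_enum_foldl_take pvWrite mb bytes 0]
    rw [show mb - 0 = mb by ring]
    rw [hg0]
  -- B's obstacle-set membership is membership in the written prefix
  have hcont : ∀ (x : Int × Int),
      (PySem.Set.ofList (PySem.List.slice bytes none (some (max 0 mb)))).contains x
      = decide (x ∈ P) := by
    intro x
    rw [PySem.Set.contains_eq_decide]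
    have hsl : PySem.List.slice bytes none (some (max 0 mb)) = P := by
      rw [PySem.List.slice_to _ (by omega : (0:Int) ≤ max 0 mb)]
      rw [show (max 0 mb).toNat = mb.toNat by omega]
    rw [hsl]
    by_cases h : x ∈ P
    · simp [h, (PySem.Set.mem_ofList P x).mpr h]
    · simp [h]
  -- A's written grid with side borders is B's interior
  have hG1 : Gfin.map (fun row => PySem.List.insert row 0 "#" ++ ["#"])
      = (PySem.List.pyRange 0 (MH + 1) 1).map (fun r =>
          "#" :: ((PySem.List.pyRange 0 (MW + 1) 1).map (fun c =>
            if (PySem.Set.ofList (PySem.List.slice bytes none (some (max 0 mb)))).contains (c, r)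
            then "#" else ".")) ++ ["#"]) := by
    apply List.ext_getElem?
    intro i
    rw [List.getElem?_map, List.getElem?_map]
    by_cases hi : i < Hn
    · have hGi : ∃ row, Gfin[i]? = some row := by
        rw [List.getElem?_eq_getElem (by rw [hlen, hg0len]; exact hi)]
        exact ⟨_, rfl⟩
      obtain ⟨row, hrow⟩ := hGi
      have hrlen : row.length = Wn := hrows row (List.mem_of_getElem? hrow)
      have hpyi : (PySem.List.pyRange 0 (MH+1) 1)[i]? = some ((0:Int) + i) := by
        rw [PySem.List.getElem?_pyRange_one]
        rw [if_pos (by omega : i < ((MH+1:Int) - 0).toNat)]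
      rw [hrow, hpyi]
      simp only [Option.map_some]
      have hrowEq : row = (PySem.List.pyRange 0 (MW + 1) 1).map (fun c =>
          if (PySem.Set.ofList (PySem.List.slice bytes none (some (max 0 mb)))).contains (c, (0:Int) + i)
          then "#" else ".") := by
        apply List.ext_getElem?
        intro j
        rw [List.getElem?_map]
        by_cases hj : j < Wn
        · have hcl := hcell i j
          rw [hrow, Option.bind_some] at hcl
          have hg0cell : (g0[i]?.bind (fun x => x[j]?)) = some "." := by
            rw [hg0def, List.getElem?_replicate, if_pos hi]
            simp [hj]
          rw [hg0cell] at hcl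
          have hpyj : (PySem.List.pyRange 0 (MW+1) 1)[j]? = some ((0:Int) + j) := by
            rw [PySem.List.getElem?_pyRange_one]
            rw [if_pos (by omega : j < ((MW+1:Int) - 0).toNat)]
          rw [hpyj, hcl]
          simp only [Option.map_some, zero_add, hcont]
          by_cases hm : ((j:Int), (i:Int)) ∈ P
          · simp [hm]
          · simp [hm]
        · rw [List.getElem?_eq_none (by omega : row.length ≤ j)]
          rw [List.getElem?_eq_none (by
            rw [PySem.List.length_pyRange_one]; omega)]
          simp
      rw [PySem.List.insert_zero, ← hrowEq]
    · rw [List.getElem?_eq_none (by rw [hlen, hg0len]; omega : Gfin.length ≤ i)]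
      rw [List.getElem?_eq_none (by
        rw [PySem.List.length_pyRange_one]; omega : (PySem.List.pyRange 0 (MH+1) 1).length ≤ i)]
      simp
  -- assemble both sides
  rw [hA]
  unfold create_memory_space_alt add_border_to_maze
  dsimp only
  rw [show (1:Int) + MW = MW + 1 by ring, show (1:Int) + MH = MH + 1 by ring]
  rw [hG1]
  rw [PySem.List.pyRange_one_cons (show (0:Int) < MH + 1 by omega), List.map_cons]
  rw [PySem.List.pyGetD_zero_cons, PySem.List.insert_zero, PySem.List.pyGetD_zero_cons]
  rw [show ("#" :: ((PySem.List.pyRange 0 (MW + 1) 1).map (fun c =>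
        if (PySem.Set.ofList (PySem.List.slice bytes none (some (max 0 mb)))).contains (c, (0:Int))
        then "#" else ".")) ++ ["#"]).length = Wn + 2 by
      simp [PySem.List.length_pyRange_one]; omega]
  rw [show List.replicate (Wn + 2) ("#":String) = List.replicate ((MW + 1) + 2).toNat "#" by
      congr 1; omega]

-- ===== VERDICT (by name: the statement is the Claim_ definition above) =====
theorem create_memory_space_spec : Claim_unchanged_create_memory_space := by
  intro bytes mb _hdom _hpre hnd
  unfold D_create_memory_space at hnd
  push Not at hnd
  exact pv_main bytes mb hnd

theorem create_memory_space_changed : Claim_changed_create_memory_space := by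
  unfold Claim_changed_create_memory_space; decide
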